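/- GENERATED by farm/mkstatement.py from design/units.tsv (unit `DGifGetWord.1`) and the assertions of Gif/Spec/ReaderSegs.lean — do not edit.
   THE STATEMENT of the proof unit `DGifGetWord.1`: segment 1 of `DGifGetWord` (18 instructions; entries 0x106063;
   exits 0x10608c; ranges 0x106063-0x10608c,0x1060a0-0x1060c2)
   takes each of its entry assertions to one of its exit assertions (`Gif.Spec.DGifGetWord.Seg1`), given the contracts of its callees.
   What the names mean: ProgX/Base/Spec/Basic.lean (the shared hypotheses), Gif/Spec/ReaderSegs.lean (the assertions). The theorem to prove:
   `theorem DGifGetWord_1_ok : Gif.Spec.DGifGetWord_1.Statement`. -/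
import Gif.Code
import Gif.Dec.All
import Gif.Labels
import Gif.Spec.Reader
import Gif.Spec.ReaderSegs
namespace Gif.Spec.DGifGetWord_1
open X86 X86.User Asan

/-- The statement of unit `DGifGetWord.1`. -/
def Statement : Prop :=
  ∀ (Lay : Layout) (_hLay : Lay.hi = 0x1000000) (μ : Microarch) (_hμ : UserX.MicroOK μ) (u₀ : State)
    (_hcode : HasCodeNat Lay u₀ Gif.L.DGifGetWord.entry Gif.Code.code_DGifGetWord.nat Gif.L.DGifGetWord.size)
    (_h_InternalRead : ∀ (H : Heap) (rest : List Obj) (frames : List (Nat × FrameLayout)) (F : Forest) (R : Rd) (n : Nat), Calls Lay μ ProgX.Base.WayInv (ProgX.Base.conv u₀) Gif.L.InternalRead.entry (Gif.Spec.InternalRead.spec H rest frames F R n))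
    (_h_asan_store4_noabort : Asan.SmallCheck Lay μ ProgX.Base.WayInv (ProgX.Base.CodeOK u₀) [.rax, .rcx, .rdx] 4 ProgX.Base.L.__asan_store4_noabort.entry),
    Gif.Spec.DGifGetWord.Seg1 Lay μ u₀

end Gif.Spec.DGifGetWord_1
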